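-- pv_equiv track=rewrite | github.com/AP-MI-2021/lab-3-AdrianSK75 | assignment_3.py | get_longest_prime_digits
-- ===== SOURCE A (Python) =====
-- def prime_digits(n):
--     """
--     determina daca numarul e format din cifre prime
--     """
--     ok = 1
--     copy = n
--     while copy != 0:
--         c = copy % 10
--         if c == 1 or c == 4 or c == 6 or c == 8 or c == 9:
--             ok = 0
--         copy = copy//10
--
--     if ok == 0:
--         return 0
--     return 1
--
-- def get_longest_prime_digits(lst):
--     """
--     determina cea mai lunga subsecv de numere formate din cifre prime
--     """
--     l = len(lst)
--     result = []
--     for i in range (l):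
--         for j in range (i, l):
--             k = prime_digits(lst[i])
--             all_prime_digits = True
--             for num in lst[i:j + 1]:
--                 if prime_digits(num) != k :
--                     all_prime_digits = False
--                     break
--             if all_prime_digits:
--                 if j - i + 1 >len(result):
--                     result = lst[i:j + 1]
--     return result
-- ===== SOURCE B (Python) =====
-- def prime_digits(n):
--     """1 iff every decimal digit of n is one of 0,2,3,5,7 (A's classification,
--     which also lets the digit 0 pass and classifies 0 itself as 1)."""
--     if n == 0:
--         return 1
--     d = n % 10
--     if d in (0, 2, 3, 5, 7):
--         return prime_digits(n // 10)
--     return 0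
--
--
-- def get_longest_prime_digits(lst):
--     """Longest contiguous run of equal prime_digits classification, first one
--     on ties: one linear scan over run starts instead of A's triple loop."""
--     best_start, best_len = 0, 0
--     n = len(lst)
--     i = 0
--     while i < n:
--         k = prime_digits(lst[i])
--         j = i + 1
--         while j < n and prime_digits(lst[j]) == k:
--             j += 1
--         if j - i > best_len:
--             best_start, best_len = i, j - i
--         i = j
--     return lst[best_start:best_start + best_len]
-- ===== Notes on version B (the rewrite author's own statement) =====
-- stated objective: faster
-- what changed: A enumerates every pair (i,j) and re-scans the slice lst[i:j+1] for uniform prime_digits classification; B does one linear scan over run starts, advancing past each maximal run and keeping the first longest, and tests prime_digits by a digit recursion instead of A's flag-carrying while loop; intended as faster (A timed out before a timing ratio could be measured).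
import Mathlib
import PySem

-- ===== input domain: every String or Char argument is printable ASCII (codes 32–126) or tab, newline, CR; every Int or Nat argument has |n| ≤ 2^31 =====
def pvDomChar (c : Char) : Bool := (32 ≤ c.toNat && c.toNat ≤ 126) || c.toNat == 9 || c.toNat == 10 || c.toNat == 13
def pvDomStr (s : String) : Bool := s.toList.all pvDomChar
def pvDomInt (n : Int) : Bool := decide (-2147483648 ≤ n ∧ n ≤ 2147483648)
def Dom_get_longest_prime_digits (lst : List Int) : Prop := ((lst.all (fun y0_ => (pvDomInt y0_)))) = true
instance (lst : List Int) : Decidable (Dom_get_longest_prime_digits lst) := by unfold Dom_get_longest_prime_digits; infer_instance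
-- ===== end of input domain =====

-- B replaces A's triple loop (all pairs i ≤ j, re-scanning each slice) by one linear scan over
-- maximal runs of equal prime_digits classification; intended as faster (a timing run could
-- not take a ratio: A already exceeded its budget at sizes where B still returned instantly).

-- ===== PORT A =====
-- while copy != 0: … ; fuel n.natAbs+1 suffices for every copy ≥ 0 (copy's natAbs strictly
-- drops each iteration); for copy < 0 the Python loop never terminates (excluded by Pre_).
def pdLoopA : Nat → Int → Int → Int
  | 0, _, _ => 0
  | fuel+1, ok, copy =>
    if copy ≠ 0 then
      let c := PySem.Int.mod copy 10
      let ok' := if c = 1 ∨ c = 4 ∨ c = 6 ∨ c = 8 ∨ c = 9 then 0 else ok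
      pdLoopA fuel ok' (PySem.Int.floordiv copy 10)
    else if ok = 0 then 0 else 1

def prime_digitsA (n : Int) : Int := pdLoopA (n.natAbs + 1) 1 n

-- for num in lst[i:j+1]: if prime_digits(num) != k: all_prime_digits = False; break
def allPrimeA (k : Int) : List Int → Bool
  | [] => true
  | num :: rest => if prime_digitsA num ≠ k then false else allPrimeA k rest

def get_longest_prime_digits (lst : List Int) : List Int :=
  let l : Int := lst.length
  (PySem.List.pyRange 0 l).foldl (fun result i =>
    (PySem.List.pyRange i l).foldl (fun result j =>
      let k := prime_digitsA (PySem.List.pyGetD lst i 0)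
      if allPrimeA k (PySem.List.slice lst (some i) (some (j+1))) then
        if j - i + 1 > (result.length : Int) then
          PySem.List.slice lst (some i) (some (j+1))
        else result
      else result) result) []

-- ===== PORT B =====
-- B's prime_digits is a recursion on n; ported with fuel n.natAbs+1, which is exact for
-- every Int (the recursion strictly shrinks |n|); branch order follows Source B.
def pdLoopB : Nat → Int → Int
  | 0, _ => 0
  | fuel+1, m =>
    if m = 0 then 1
    else if PySem.Int.mod m 10 = 0 ∨ PySem.Int.mod m 10 = 2 ∨ PySem.Int.mod m 10 = 3 ∨
            PySem.Int.mod m 10 = 5 ∨ PySem.Int.mod m 10 = 7 then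
      pdLoopB fuel (PySem.Int.floordiv m 10)
    else 0

def prime_digitsB (n : Int) : Int := pdLoopB (n.natAbs + 1) n

-- inner while: 'while j < n and prime_digits(lst[j]) == k: j += 1';
-- fuel (n-j).toNat is exactly the number of remaining indices, so the port is exact.
def scanRunBF (lst : List Int) (n k : Int) : Nat → Int → Int
  | 0, j => j
  | fuel+1, j =>
    if j < n then
      if prime_digitsB (PySem.List.pyGetD lst j 0) = k then scanRunBF lst n k fuel (j+1)
      else j
    else j

def scanRunB (lst : List Int) (n k j : Int) : Int := scanRunBF lst n k (n - j).toNat j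

-- outer while: fuel (n-i).toNat bounds the number of iterations (i strictly increases)
def mainLoopBF (lst : List Int) (n : Int) : Nat → Int → Int → Int → Int × Int
  | 0, bs, bl, _ => (bs, bl)
  | fuel+1, bs, bl, i =>
    if i < n then
      let k := prime_digitsB (PySem.List.pyGetD lst i 0)
      let j := scanRunB lst n k (i+1)
      let p := if j - i > bl then (i, j - i) else (bs, bl)
      mainLoopBF lst n fuel p.1 p.2 j
    else (bs, bl)

def mainLoopB (lst : List Int) (n bs bl i : Int) : Int × Int :=
  mainLoopBF lst n (n - i).toNat bs bl i

def get_longest_prime_digits_alt (lst : List Int) : List Int :=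
  let n : Int := lst.length
  let p := mainLoopB lst n 0 0 0
  PySem.List.slice lst (some p.1) (some (p.1 + p.2))

-- ===== PRECONDITION & SPEC =====
-- Pre_ excludes lists containing a negative element: on those A's prime_digits loop
-- 'while copy != 0: copy = copy//10' never terminates (copy//10 stays -1), so A never returns.
def Pre_get_longest_prime_digits (lst : List Int) : Prop := ∀ x ∈ lst, 0 ≤ x
instance (lst : List Int) : Decidable (Pre_get_longest_prime_digits lst) := by
  unfold Pre_get_longest_prime_digits; infer_instance
def pvWitness_get_longest_prime_digits : List Int := [23, 5, 14, 7, 0]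

def Spec_get_longest_prime_digits (lst : List Int) (out : List Int) : Prop := out = get_longest_prime_digits_alt lst
instance (lst : List Int) (out : List Int) : Decidable (Spec_get_longest_prime_digits lst out) := by unfold Spec_get_longest_prime_digits; infer_instance

-- ===== CLAIM (what is proved, stated in full; the proofs are below) =====
def Claim_equal_get_longest_prime_digits : Prop := ∀ (lst : List Int), Dom_get_longest_prime_digits lst → Pre_get_longest_prime_digits lst → Spec_get_longest_prime_digits lst (get_longest_prime_digits lst)

-- ===== LEMMAS AND PROOFS =====

-- fuel irrelevance for B's digit recursion (any fuel above |m| computes the same value)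
theorem pdLoopB_irrel : ∀ f1 : Nat, ∀ (m : Int) (f2 : Nat), m.natAbs < f1 → m.natAbs < f2 →
    pdLoopB f1 m = pdLoopB f2 m := by
  intro f1
  induction f1 with
  | zero => intro m f2 h1 h2; omega
  | succ f1 ih =>
    intro m f2 h1 h2
    obtain ⟨f2', rfl⟩ : ∃ f2', f2 = f2' + 1 := ⟨f2 - 1, by omega⟩
    by_cases hm : m = 0
    · subst hm; rfl
    · rw [pdLoopB, pdLoopB, if_neg hm, if_neg hm]
      by_cases hg : PySem.Int.mod m 10 = 0 ∨ PySem.Int.mod m 10 = 2 ∨ PySem.Int.mod m 10 = 3 ∨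
          PySem.Int.mod m 10 = 5 ∨ PySem.Int.mod m 10 = 7
      · rw [if_pos hg, if_pos hg]
        have h10 : (0:Int) < 10 := by norm_num
        have hfm := PySem.Int.floordiv_mul_add_mod m 10
        have hm0 := PySem.Int.mod_nonneg m h10
        have hml := PySem.Int.mod_lt m h10
        exact ih _ f2' (by omega) (by omega)
      · rw [if_neg hg, if_neg hg]

-- one-step unfolding of B's digit recursion
theorem pdB_unfold (m : Int) : prime_digitsB m =
    if m = 0 then 1
    else if PySem.Int.mod m 10 = 0 ∨ PySem.Int.mod m 10 = 2 ∨ PySem.Int.mod m 10 = 3 ∨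
            PySem.Int.mod m 10 = 5 ∨ PySem.Int.mod m 10 = 7 then
      prime_digitsB (PySem.Int.floordiv m 10)
    else 0 := by
  by_cases hm : m = 0
  · subst hm; rfl
  · rw [prime_digitsB, pdLoopB, if_neg hm, if_neg hm]
    by_cases hg : PySem.Int.mod m 10 = 0 ∨ PySem.Int.mod m 10 = 2 ∨ PySem.Int.mod m 10 = 3 ∨
        PySem.Int.mod m 10 = 5 ∨ PySem.Int.mod m 10 = 7
    · rw [if_pos hg, if_pos hg, prime_digitsB]
      have h10 : (0:Int) < 10 := by norm_num
      have hfm := PySem.Int.floordiv_mul_add_mod m 10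
      have hm0 := PySem.Int.mod_nonneg m h10
      have hml := PySem.Int.mod_lt m h10
      exact pdLoopB_irrel _ _ _ (by omega) (by omega)
    · rw [if_neg hg, if_neg hg]

-- the two digit classifiers agree on nonnegative numbers
theorem pdLoopA_eq (fuel : Nat) : ∀ ok copy : Int, 0 ≤ copy → copy.natAbs < fuel →
    pdLoopA fuel ok copy = if ok = 0 then 0 else prime_digitsB copy := by
  induction fuel with
  | zero => intro ok copy h1 h2; omega
  | succ fuel ih =>
    intro ok copy h1 h2
    by_cases hc : copy = 0
    · subst hc
      rw [pdLoopA, if_neg (by simp)]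
      simp [prime_digitsB, pdLoopB]
    · have h10 : (0:Int) < 10 := by norm_num
      have hfm := PySem.Int.floordiv_mul_add_mod copy 10
      have hm0 := PySem.Int.mod_nonneg copy h10
      have hml := PySem.Int.mod_lt copy h10
      have hq0 : 0 ≤ PySem.Int.floordiv copy 10 := by omega
      have hqa : (PySem.Int.floordiv copy 10).natAbs < fuel := by omega
      rw [pdLoopA, if_pos hc]
      conv_rhs => rw [pdB_unfold copy]
      rw [if_neg hc]
      rw [ih _ _ hq0 hqa]
      split_ifs <;> first | rfl | omega

theorem pd_eq (n : Int) (hn : 0 ≤ n) : prime_digitsA n = prime_digitsB n := by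
  have := pdLoopA_eq (n.natAbs + 1) 1 n hn (by omega)
  simpa [prime_digitsA] using this

theorem allPrimeA_iff (k : Int) (xs : List Int) :
    allPrimeA k xs = true ↔ ∀ x ∈ xs, prime_digitsA x = k := by
  induction xs with
  | nil => simp [allPrimeA]
  | cons x xs ih => by_cases h : prime_digitsA x = k <;> simp [allPrimeA, h, ih]

-- class of the element at (Int) index t
def clsAt (lst : List Int) (t : Int) : Int := prime_digitsB (PySem.List.pyGetD lst t 0)

theorem len_slice (lst : List Int) (a b : Int) (h0 : 0 ≤ a) (hab : a ≤ b)
    (hb : b ≤ (lst.length : Int)) :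
    ((PySem.List.slice lst (some a) (some b)).length : Int) = b - a := by
  have hb0 : 0 ≤ b := by omega
  lift a to Nat using h0 with a'
  lift b to Nat using hb0 with b'
  rw [PySem.List.slice_natCast]
  simp only [List.length_take, List.length_drop]
  omega

theorem mem_slice_iff (lst : List Int) (a b : Int) (x : Int) (h0 : 0 ≤ a) (hab : a ≤ b)
    (hb : b ≤ (lst.length : Int)) :
    x ∈ PySem.List.slice lst (some a) (some b) ↔
      ∃ t : Int, a ≤ t ∧ t < b ∧ PySem.List.pyGetD lst t 0 = x := by
  have hb0 : 0 ≤ b := by omega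
  lift a to Nat using h0 with a'
  lift b to Nat using hb0 with b'
  rw [PySem.List.slice_natCast]
  constructor
  · intro hx
    rcases List.mem_iff_getElem.mp hx with ⟨u, hu, hval⟩
    have hu' : u < b' - a' := by
      have := List.length_take_le (b' - a') (List.drop a' lst)
      omega
    have hlen : a' + u < lst.length := by
      simp only [List.length_take, List.length_drop] at hu
      omega
    refine ⟨((a' + u : Nat) : Int), by omega, by omega, ?_⟩
    rw [PySem.List.pyGetD_natCast, List.getD_eq_getElem _ _ hlen]
    rw [List.getElem_take, List.getElem_drop] at hval
    exact hval
  · rintro ⟨t, hta, htb, hval⟩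
    have ht0 : 0 ≤ t := by omega
    lift t to Nat using ht0 with t'
    have htl : t' < lst.length := by omega
    rw [PySem.List.pyGetD_natCast, List.getD_eq_getElem _ _ htl] at hval
    rw [← hval]
    apply List.mem_iff_getElem.mpr
    have hu : t' - a' < (List.take (b' - a') (List.drop a' lst)).length := by
      simp only [List.length_take, List.length_drop]; omega
    refine ⟨t' - a', hu, ?_⟩
    rw [List.getElem_take, List.getElem_drop]
    congr 1
    omega

-- elements of the list are nonnegative under Pre_, hence pd_eq applies pointwise
theorem clsAt_eq_pdA (lst : List Int) (hpre : Pre_get_longest_prime_digits lst) (t : Int)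
    (h0 : 0 ≤ t) (ht : t < (lst.length : Int)) :
    prime_digitsA (PySem.List.pyGetD lst t 0) = clsAt lst t := by
  have hx : PySem.List.pyGetD lst t 0 ∈ lst := by
    rw [PySem.List.pyGetD_eq_getElem lst 0 h0 ht]
    exact List.getElem_mem _
  exact pd_eq _ (hpre _ hx)

-- characterisation of B's inner while loop
theorem le_scanRunBF (lst : List Int) (n k : Int) : ∀ fuel : Nat, ∀ j : Int,
    j ≤ scanRunBF lst n k fuel j := by
  intro fuel
  induction fuel with
  | zero => intro j; exact le_refl _
  | succ fuel ih =>
    intro j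
    rw [scanRunBF]
    by_cases h1 : j < n
    · rw [if_pos h1]
      by_cases h2 : prime_digitsB (PySem.List.pyGetD lst j 0) = k
      · rw [if_pos h2]; have := ih (j+1); omega
      · rw [if_neg h2]
    · rw [if_neg h1]

theorem scanRunBF_spec (lst : List Int) (n k : Int) : ∀ fuel : Nat, ∀ j : Int, j ≤ n →
    (n - j).toNat ≤ fuel →
    j ≤ scanRunBF lst n k fuel j ∧ scanRunBF lst n k fuel j ≤ n ∧
    (∀ t, j ≤ t → t < scanRunBF lst n k fuel j → clsAt lst t = k) ∧
    (scanRunBF lst n k fuel j < n → clsAt lst (scanRunBF lst n k fuel j) ≠ k) := by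
  intro fuel
  induction fuel with
  | zero =>
    intro j hj hf
    have hjn : j = n := by omega
    refine ⟨le_refl _, by simp [scanRunBF]; omega, ?_, ?_⟩
    · intro t h1 h2
      simp only [scanRunBF] at h2
      omega
    · intro h'
      simp only [scanRunBF] at h'
      omega
  | succ fuel ih =>
    intro j hj hf
    rw [scanRunBF]
    by_cases h1 : j < n
    · rw [if_pos h1]
      by_cases h2 : prime_digitsB (PySem.List.pyGetD lst j 0) = k
      · rw [if_pos h2]
        obtain ⟨ha, hb, hu, hbd⟩ := ih (j+1) (by omega) (by omega)
        refine ⟨by omega, hb, ?_, hbd⟩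
        intro t ht1 ht2
        by_cases htj : t = j
        · subst htj; exact h2
        · exact hu t (by omega) ht2
      · rw [if_neg h2]
        exact ⟨le_refl _, by omega, by intro t h3 h4; omega, fun _ => h2⟩
    · rw [if_neg h1]
      exact ⟨le_refl _, hj, by intro t h3 h4; omega, by intro h'; omega⟩

theorem scanRunB_spec (lst : List Int) (n k : Int) : ∀ j, j ≤ n →
    j ≤ scanRunB lst n k j ∧ scanRunB lst n k j ≤ n ∧
    (∀ t, j ≤ t → t < scanRunB lst n k j → clsAt lst t = k) ∧
    (scanRunB lst n k j < n → clsAt lst (scanRunB lst n k j) ≠ k) := by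
  intro j hj
  exact scanRunBF_spec lst n k ((n - j).toNat) j hj (le_refl _)

-- the body of A's inner loop / A's outer loop, named for the proofs
def innerStep (lst : List Int) (i : Int) (result : List Int) (j : Int) : List Int :=
  if allPrimeA (prime_digitsA (PySem.List.pyGetD lst i 0))
      (PySem.List.slice lst (some i) (some (j+1))) then
    if j - i + 1 > (result.length : Int) then PySem.List.slice lst (some i) (some (j+1))
    else result
  else result

def outerStep (lst : List Int) (result : List Int) (i : Int) : List Int :=
  (PySem.List.pyRange i (lst.length : Int)).foldl (innerStep lst i) result

theorem A_eq_fold (lst : List Int) :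
    get_longest_prime_digits lst =
      (PySem.List.pyRange 0 (lst.length : Int)).foldl (outerStep lst) [] := rfl

-- A's uniformity test succeeds on a slice inside a uniform region
theorem allPrime_true (lst : List Int) (hpre : Pre_get_longest_prime_digits lst) (i j : Int)
    (h0 : 0 ≤ i) (hij : i ≤ j) (hjn : j < (lst.length : Int))
    (uni : ∀ t, i ≤ t → t ≤ j → clsAt lst t = clsAt lst i) :
    allPrimeA (prime_digitsA (PySem.List.pyGetD lst i 0))
      (PySem.List.slice lst (some i) (some (j+1))) = true := by
  rw [allPrimeA_iff]
  intro x hx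
  rcases (mem_slice_iff lst i (j+1) x h0 (by omega) (by omega)).mp hx with ⟨t, ht1, ht2, hval⟩
  rw [← hval, clsAt_eq_pdA lst hpre t (by omega) (by omega),
      clsAt_eq_pdA lst hpre i h0 (by omega)]
  exact uni t ht1 (by omega)

-- and fails as soon as the slice reaches an index of different class
theorem allPrime_false (lst : List Int) (hpre : Pre_get_longest_prime_digits lst) (i e j : Int)
    (h0 : 0 ≤ i) (hie : i ≤ e) (hej : e ≤ j) (hjn : j < (lst.length : Int))
    (hne : clsAt lst e ≠ clsAt lst i) :
    allPrimeA (prime_digitsA (PySem.List.pyGetD lst i 0))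
      (PySem.List.slice lst (some i) (some (j+1))) = false := by
  rw [Bool.eq_false_iff]
  intro hall
  rw [allPrimeA_iff] at hall
  have hmem : PySem.List.pyGetD lst e 0 ∈ PySem.List.slice lst (some i) (some (j+1)) :=
    (mem_slice_iff lst i (j+1) _ h0 (by omega) (by omega)).mpr ⟨e, hie, by omega, rfl⟩
  have := hall _ hmem
  rw [clsAt_eq_pdA lst hpre e (by omega) (by omega),
      clsAt_eq_pdA lst hpre i h0 (by omega)] at this
  exact hne this

-- past the run boundary A's inner body leaves the result unchanged
theorem inner_noop (lst : List Int) (hpre : Pre_get_longest_prime_digits lst) (i e j : Int)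
    (h0 : 0 ≤ i) (hie : i ≤ e) (hej : e ≤ j) (hjn : j < (lst.length : Int))
    (hne : clsAt lst e ≠ clsAt lst i) (res : List Int) :
    innerStep lst i res j = res := by
  unfold innerStep
  rw [allPrime_false lst hpre i e j h0 hie hej hjn hne]
  simp

-- A's inner loop over a uniform region [j, e): one closed form
theorem inner_main (lst : List Int) (hpre : Pre_get_longest_prime_digits lst) (i e : Int)
    (h0 : 0 ≤ i) (hie : i < e) (hen : e ≤ (lst.length : Int))
    (uni : ∀ t, i ≤ t → t < e → clsAt lst t = clsAt lst i) :
    ∀ m : Nat, ∀ j res, i ≤ j → j ≤ e → (e - j).toNat = m →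
      (PySem.List.pyRange j e).foldl (innerStep lst i) res =
        if e - i > (res.length : Int) ∧ j < e then PySem.List.slice lst (some i) (some e)
        else res := by
  intro m
  induction m with
  | zero =>
    intro j res hij hje hm
    have : j = e := by omega
    subst this
    rw [PySem.List.pyRange_one_eq_nil (le_refl _), if_neg (by omega)]
    rfl
  | succ m ih =>
    intro j res hij hje hm
    have hjlt : j < e := by omega
    rw [PySem.List.pyRange_one_cons hjlt, List.foldl_cons]
    have hstep : innerStep lst i res j =
        if j - i + 1 > (res.length : Int) then PySem.List.slice lst (some i) (some (j+1))
        else res := by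
      unfold innerStep
      rw [allPrime_true lst hpre i j h0 hij (by omega) (fun t ht1 ht2 => uni t ht1 (by omega))]
      simp
    rw [hstep]
    by_cases hcand : j - i + 1 > (res.length : Int)
    · rw [if_pos hcand]
      have hlen : ((PySem.List.slice lst (some i) (some (j+1))).length : Int) = j + 1 - i :=
        len_slice lst i (j+1) h0 (by omega) (by omega)
      by_cases hend : j + 1 < e
      · rw [ih (j+1) _ (by omega) (by omega) (by omega), if_pos (by omega),
            if_pos ⟨by omega, hjlt⟩]
      · have hje1 : j + 1 = e := by omega
        rw [ih (j+1) _ (by omega) (by omega) (by omega), if_neg (by omega),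
            if_pos ⟨by omega, hjlt⟩, hje1]
    · rw [if_neg hcand]
      rw [ih (j+1) res (by omega) (by omega) (by omega)]
      by_cases hbig : e - i > (res.length : Int)
      · by_cases hend : j + 1 < e
        · rw [if_pos ⟨hbig, hend⟩, if_pos ⟨hbig, hjlt⟩]
        · omega
      · rw [if_neg (by omega), if_neg (by omega)]

-- the full inner loop (A's body at outer index i) in closed form
theorem outerStep_eq (lst : List Int) (hpre : Pre_get_longest_prime_digits lst) (i e : Int)
    (h0 : 0 ≤ i) (hie : i < e) (hen : e ≤ (lst.length : Int))
    (uni : ∀ t, i ≤ t → t < e → clsAt lst t = clsAt lst i)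
    (bnd : e < (lst.length : Int) → clsAt lst e ≠ clsAt lst i) (res : List Int) :
    outerStep lst res i =
      if e - i > (res.length : Int) then PySem.List.slice lst (some i) (some e) else res := by
  unfold outerStep
  rw [PySem.List.pyRange_one_append i e (lst.length : Int) (by omega) hen, List.foldl_append]
  rw [inner_main lst hpre i e h0 hie hen uni ((e - i).toNat) i res (le_refl _) (by omega) rfl]
  have hnoop : ∀ (acc : List Int), ∀ j ∈ PySem.List.pyRange e (lst.length : Int),
      innerStep lst i acc j = acc := by
    intro acc j hj
    rw [PySem.List.mem_pyRange_one] at hj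
    exact inner_noop lst hpre i e j h0 (by omega) hj.1 hj.2 (bnd (by omega)) acc
  rw [PySem.List.foldl_congr_mem _ _ (fun acc _ => acc) _ hnoop, List.foldl_fixed]
  by_cases hbig : e - i > (res.length : Int)
  · rw [if_pos ⟨hbig, hie⟩, if_pos hbig]
  · rw [if_neg (by omega), if_neg hbig]

-- inside a run, every later start yields a shorter candidate: the outer body is a no-op
theorem run_tail_noop (lst : List Int) (hpre : Pre_get_longest_prime_digits lst) (i e : Int)
    (h0 : 0 ≤ i) (hie : i < e) (hen : e ≤ (lst.length : Int))
    (uni : ∀ t, i ≤ t → t < e → clsAt lst t = clsAt lst i)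
    (bnd : e < (lst.length : Int) → clsAt lst e ≠ clsAt lst i) :
    ∀ m : Nat, ∀ j res, i < j → j ≤ e → (e - j).toNat = m → e - i ≤ (res.length : Int) →
      (PySem.List.pyRange j e).foldl (outerStep lst) res = res := by
  intro m
  induction m with
  | zero =>
    intro j res hij hje hm hlen
    have : j = e := by omega
    subst this
    rw [PySem.List.pyRange_one_eq_nil (le_refl _)]
    rfl
  | succ m ih =>
    intro j res hij hje hm hlen
    have hjlt : j < e := by omega
    rw [PySem.List.pyRange_one_cons hjlt, List.foldl_cons]
    have uni' : ∀ t, j ≤ t → t < e → clsAt lst t = clsAt lst j := by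
      intro t ht1 ht2
      rw [uni t (by omega) ht2, uni j (by omega) (by omega)]
    have bnd' : e < (lst.length : Int) → clsAt lst e ≠ clsAt lst j := by
      intro hen' hcontra
      exact bnd hen' (hcontra.trans (uni j (by omega) (by omega)))
    rw [outerStep_eq lst hpre j e (by omega) hjlt hen uni' bnd' res, if_neg (by omega)]
    exact ih (j+1) res (by omega) (by omega) (by omega) hlen

-- fuel irrelevance for B's main loop
theorem mainLoopBF_irrel (lst : List Int) (n : Int) : ∀ f1 : Nat, ∀ (f2 : Nat) (bs bl i : Int),
    (n - i).toNat ≤ f1 → (n - i).toNat ≤ f2 →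
    mainLoopBF lst n f1 bs bl i = mainLoopBF lst n f2 bs bl i := by
  intro f1
  induction f1 with
  | zero =>
    intro f2 bs bl i h1 h2
    have hni : ¬ i < n := by omega
    cases f2 with
    | zero => rfl
    | succ f2' => rw [mainLoopBF, mainLoopBF, if_neg hni]
  | succ f1 ih =>
    intro f2 bs bl i h1 h2
    by_cases hni : i < n
    · obtain ⟨f2', rfl⟩ : ∃ f2', f2 = f2' + 1 := ⟨f2 - 1, by omega⟩
      rw [mainLoopBF, mainLoopBF, if_pos hni, if_pos hni]
      have hj := le_scanRunBF lst n (prime_digitsB (PySem.List.pyGetD lst i 0))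
        ((n - (i+1)).toNat) (i+1)
      exact ih f2' _ _ _ (by simp only [scanRunB]; omega) (by simp only [scanRunB]; omega)
    · cases f2 with
      | zero => rw [mainLoopBF, mainLoopBF, if_neg hni]
      | succ f2' => rw [mainLoopBF, mainLoopBF, if_neg hni, if_neg hni]

-- one unfolding step of B's main loop
theorem mainLoopB_step (lst : List Int) (n bs bl i : Int) (h : i < n) :
    mainLoopB lst n bs bl i =
      mainLoopB lst n
        (if scanRunB lst n (prime_digitsB (PySem.List.pyGetD lst i 0)) (i+1) - i > bl
         then (i, scanRunB lst n (prime_digitsB (PySem.List.pyGetD lst i 0)) (i+1) - i)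
         else (bs, bl)).1
        (if scanRunB lst n (prime_digitsB (PySem.List.pyGetD lst i 0)) (i+1) - i > bl
         then (i, scanRunB lst n (prime_digitsB (PySem.List.pyGetD lst i 0)) (i+1) - i)
         else (bs, bl)).2
        (scanRunB lst n (prime_digitsB (PySem.List.pyGetD lst i 0)) (i+1)) := by
  have hj := le_scanRunBF lst n (prime_digitsB (PySem.List.pyGetD lst i 0))
    ((n - (i+1)).toNat) (i+1)
  unfold mainLoopB
  rw [show (n - i).toNat = ((n - i).toNat - 1) + 1 from by omega, mainLoopBF, if_pos h]
  exact mainLoopBF_irrel lst n _ _ _ _ _ (by simp only [scanRunB]; omega)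
    (by simp only [scanRunB]; omega)

-- the outer loop, jumping run by run, equals B's main loop
theorem outer_main (lst : List Int) (hpre : Pre_get_longest_prime_digits lst) :
    ∀ m : Nat, ∀ i bs bl : Int, ((lst.length : Int) - i).toNat = m → 0 ≤ i →
      i ≤ (lst.length : Int) → 0 ≤ bs → 0 ≤ bl → bs + bl ≤ (lst.length : Int) →
      (PySem.List.pyRange i (lst.length : Int)).foldl (outerStep lst)
          (PySem.List.slice lst (some bs) (some (bs+bl))) =
        (fun p : Int × Int => PySem.List.slice lst (some p.1) (some (p.1+p.2)))
          (mainLoopB lst (lst.length : Int) bs bl i) := by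
  intro m
  induction m using Nat.strong_induction_on with
  | _ m ih =>
    intro i bs bl hm h0 hin hbs0 hbl0 hbsn
    by_cases hlt : i < (lst.length : Int)
    · set n : Int := (lst.length : Int) with hn
      set k : Int := prime_digitsB (PySem.List.pyGetD lst i 0) with hk
      set e : Int := scanRunB lst n k (i+1) with he
      obtain ⟨he1, he2, heu, heb⟩ := scanRunB_spec lst n k (i+1) (by omega)
      rw [← he] at he1 he2 heu heb
      have hki : k = clsAt lst i := rfl
      have uni : ∀ t, i ≤ t → t < e → clsAt lst t = clsAt lst i := by
        intro t ht1 ht2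
        by_cases hti : t = i
        · subst hti; rfl
        · rw [heu t (by omega) ht2, hki]
      have bnd : e < n → clsAt lst e ≠ clsAt lst i := by
        intro hen hcontra
        exact heb hen (by rw [hcontra, hki])
      have hresl : ((PySem.List.slice lst (some bs) (some (bs+bl))).length : Int) = bl := by
        rw [len_slice lst bs (bs+bl) hbs0 (by omega) hbsn]; ring
      -- split the outer range at the end of the current run
      rw [PySem.List.pyRange_one_append i e n (by omega) he2, List.foldl_append,
          PySem.List.pyRange_one_cons (show i < e by omega), List.foldl_cons]
      rw [outerStep_eq lst hpre i e (by omega) (by omega) he2 uni bnd, hresl]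
      set res' : List Int :=
        if e - i > bl then PySem.List.slice lst (some i) (some e)
        else PySem.List.slice lst (some bs) (some (bs+bl)) with hres'
      have hresl' : (res'.length : Int) = if e - i > bl then e - i else bl := by
        rw [hres']
        by_cases hb : e - i > bl
        · rw [if_pos hb, if_pos hb, len_slice lst i e (by omega) (by omega) (by omega)]
        · rw [if_neg hb, if_neg hb, hresl]
      -- the remaining indices inside the run change nothing
      have hmid : (PySem.List.pyRange (i+1) e).foldl (outerStep lst) res' = res' := by
        by_cases hiee : i + 1 = e
        · rw [← hiee, PySem.List.pyRange_one_eq_nil (le_refl _)]; rfl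
        · exact run_tail_noop lst hpre i e (by omega) (by omega) he2 uni bnd
            ((e - (i+1)).toNat) (i+1) res' (by omega) (by omega) rfl
            (by rw [hresl']; by_cases hb : e - i > bl
                · rw [if_pos hb]
                · rw [if_neg hb]; omega)
      rw [hmid]
      -- one step of B's main loop
      rw [mainLoopB_step lst n bs bl i hlt, ← hk, ← he]
      by_cases hb : e - i > bl
      · have hres'' : res' = PySem.List.slice lst (some i) (some (i + (e - i))) := by
          rw [hres', if_pos hb]
          norm_num
        rw [hres'']
        have := ih ((n - e).toNat) (by omega) e i (e - i) rfl (by omega) he2 (by omega)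
          (by omega) (by omega)
        rw [if_pos hb, this]
      · have hres'' : res' = PySem.List.slice lst (some bs) (some (bs + bl)) := by
          rw [hres', if_neg hb]
        rw [hres'']
        have := ih ((n - e).toNat) (by omega) e bs bl rfl (by omega) he2 hbs0 hbl0 hbsn
        rw [if_neg hb, this]
    · have hieq : i = (lst.length : Int) := by omega
      subst hieq
      rw [PySem.List.pyRange_one_eq_nil (le_refl _)]
      unfold mainLoopB
      rw [show ((lst.length : Int) - (lst.length : Int)).toNat = 0 from by omega]
      rfl

-- ===== VERDICT (by name: the statement is the Claim_ definition above) =====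
theorem get_longest_prime_digits_spec : Claim_equal_get_longest_prime_digits := by
  intro lst _hdom hpre
  unfold Spec_get_longest_prime_digits
  rw [A_eq_fold]
  have hempty : PySem.List.slice lst (some 0) (some (0+0)) = [] := by
    rw [show ((0:Int)+0) = ((0:Nat):Int) by norm_num, show ((0:Int)) = ((0:Nat):Int) by norm_num,
        PySem.List.slice_natCast]
    simp
  have hmain := outer_main lst hpre ((lst.length : Int) - 0).toNat 0 0 0 rfl (le_refl _)
    (by omega) (le_refl _) (le_refl _) (by omega)
  rw [hempty] at hmain
  rw [hmain]
  rfl
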